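-- pv_equiv track=rewrite | github.com/alexandraback/datacollection | solutions_5744014401732608_0/Python/felaw/B.py | solve
-- ===== SOURCE A (Python) =====
-- def solve(b, m):
--     if m > 2**(b-2):
--         return 'IMPOSSIBLE'
--     matrix = [[0]*(b-1)+[1]]
--     for source in range(1, b):
--         row = []
--         for dest in range(b):
--             if dest <= source:
--                 row.append(0)
--             else:
--                 row.append(1)
--         matrix.append(row)
--     m -= 1
--     pos = b-1
--     while m > 0:
--         pos -= 1
--         if m % 2 == 1:
--             matrix[0][pos] = 1
--         m //= 2
--     rows = [''.join(str(i) for i in r) for r in matrix]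
--     return "POSSIBLE\n%s" % '\n'.join(rows)
-- ===== SOURCE B (Python) =====
-- def solve(b, m):
--     if m > 2 ** (b - 2):
--         return 'IMPOSSIBLE'
--     k = max(m - 1, 0)
--     w = max(b - 1, 0)  # last column index; also the number of non-first rows
--     cols = []
--     for j in range(w + 1):
--         top = '1' if j == w or (k >> (w - 1 - j)) & 1 else '0'
--         ones = max(j - 1, 0)
--         cols.append(top + '1' * ones + '0' * (w - ones))
--     rows = [''.join(t) for t in zip(*cols)]
--     return 'POSSIBLE\n' + '\n'.join(rows)
-- ===== Notes on version B (the rewrite author's own statement) =====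
-- stated objective: alternative
-- what changed: B builds the matrix column-major (each column is one top character from the bits of m-1 plus a run of ones over a run of zeros) and obtains the rows by transposing with zip(*cols), instead of A's row-major matrix construction with an inner dest loop and a bit-writing while loop mutating row 0.
import Mathlib
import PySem

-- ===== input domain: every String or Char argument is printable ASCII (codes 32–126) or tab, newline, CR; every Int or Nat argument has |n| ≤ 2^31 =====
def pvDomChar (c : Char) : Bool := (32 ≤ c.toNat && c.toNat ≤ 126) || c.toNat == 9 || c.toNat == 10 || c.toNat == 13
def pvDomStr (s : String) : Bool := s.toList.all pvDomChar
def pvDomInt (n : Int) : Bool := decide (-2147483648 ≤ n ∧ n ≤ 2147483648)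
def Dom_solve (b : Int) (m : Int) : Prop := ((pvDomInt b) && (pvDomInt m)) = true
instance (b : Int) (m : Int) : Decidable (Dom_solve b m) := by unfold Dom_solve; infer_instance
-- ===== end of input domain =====

-- B builds the matrix column-major (each column = one top bit char of m-1, then a run of '1's
-- over a run of '0's) and transposes with zip(*cols), instead of A's row-major loops and
-- bit-writing while loop: an alternative traversal, same cost.


-- ===== PORT A =====
-- Python's `2**(b-2)` is an exact integer for b ≥ 2, and for b < 2 a float in (0,1] (or an
-- underflowed 0.0); in both float cases `m > 2**(b-2)` is exactly `1 ≤ m` for an integer m.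
def solveGuard (b : Int) (m : Int) : Bool :=
  if 2 ≤ b then decide ((2 : Int) ^ (b - 2).toNat < m) else decide (1 ≤ m)

-- `while m > 0: pos -= 1; if m % 2 == 1: matrix[0][pos] = 1; m //= 2` — the loop mutates only
-- the first row of the matrix, carried here explicitly as `row`.
def solveWhile (m : Int) (pos : Int) (row : List Int) : List Int :=
  if h : 0 < m then
    solveWhile (PySem.Int.floordiv m 2) (pos - 1)
      (if PySem.Int.mod m 2 = 1 then PySem.List.pySetD row (pos - 1) 1 else row)
  else row
termination_by m.toNat
decreasing_by
  have h2 : PySem.Int.floordiv m 2 = m / 2 := PySem.Int.floordiv_eq_ediv_of_pos (by omega : (0:Int) < 2)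
  rw [h2]; omega

def solve (b : Int) (m : Int) : String :=
  if solveGuard b m then "IMPOSSIBLE"
  else
    let matrix : List (List Int) := [List.replicate (b - 1).toNat (0 : Int) ++ [1]]
    let matrix := (PySem.List.pyRange 1 b 1).foldl (fun mat source =>
      mat ++ [(PySem.List.pyRange 0 b 1).foldl
        (fun row dest => row ++ [if dest ≤ source then (0 : Int) else 1]) []]) matrix
    let matrix := solveWhile (m - 1) (b - 1) (PySem.List.pyGetD matrix 0 []) :: matrix.tail
    let rows := matrix.map (fun r => PySem.Str.join "" (r.map PySem.Int.toStr))
    "POSSIBLE\n" ++ PySem.Str.join "\n" rows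

-- ===== PORT B =====
-- `zip(*cols)` on a list of strings: rows of characters until the shortest string is exhausted.
def tzCols (cols : List (List Char)) : List (List Char) :=
  if h : cols = [] ∨ cols.any List.isEmpty = true then []
  else (cols.map (fun c => c.headD ' ')) :: tzCols (cols.map List.tail)
termination_by (cols.headD []).length
decreasing_by
  push_neg at h
  obtain ⟨h1, h2⟩ := h
  cases cols with
  | nil => exact absurd rfl h1
  | cons c cs =>
    cases c with
    | nil => simp at h2
    | cons a t => simp

-- Source B's guard is the same line as A's (see the note above solveGuard).  In
-- `j == w or (k >> (w-1-j)) & 1` Python evaluates the shift only when j ≠ w, where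
-- w-1-j ≥ 0; the total `.toNat` below agrees there and the disjunct is shadowed at j = w.
def solve_alt (b : Int) (m : Int) : String :=
  if (if 2 ≤ b then decide ((2 : Int) ^ (b - 2).toNat < m) else decide (1 ≤ m)) then "IMPOSSIBLE"
  else
    let k := max (m - 1) 0
    let w := max (b - 1) 0
    let cols := (PySem.List.pyRange 0 (w + 1) 1).foldl (fun acc j =>
      acc ++ [(if j = w ∨ PySem.Int.band (k >>> (w - 1 - j).toNat) 1 ≠ 0 then "1" else "0")
        ++ String.ofList (List.replicate (max (j - 1) 0).toNat '1')
        ++ String.ofList (List.replicate (w - max (j - 1) 0).toNat '0')]) []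
    let rows := (tzCols (cols.map String.toList)).map (fun t => String.ofList t)
    "POSSIBLE\n" ++ PySem.Str.join "\n" rows

-- ===== PRECONDITION & SPEC =====
def Spec_solve (b : Int) (m : Int) (out : String) : Prop := out = solve_alt b m
instance (b : Int) (m : Int) (out : String) : Decidable (Spec_solve b m out) := by unfold Spec_solve; infer_instance

-- ===== CLAIM (what is proved, stated in full; the proofs are below) =====
def Claim_equal_solve : Prop := ∀ (b : Int) (m : Int), Dom_solve b m → Spec_solve b m (solve b m)

-- ===== LEMMAS AND PROOFS =====

theorem pv_foldl_push {α β : Type} (l : List α) (f : α → β) (init : List β) :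
    l.foldl (fun acc x => acc ++ [f x]) init = init ++ l.map f := by
  induction l generalizing init with
  | nil => simp
  | cons a t ih => simp [List.foldl_cons, ih]

theorem pv_mapIdx_id {α : Type} (l : List α) : l.mapIdx (fun _ x => x) = l := by
  apply List.ext_getElem <;> simp

theorem pv_solveWhile_nonpos (m pos : Int) (row : List Int) (h : ¬ 0 < m) :
    solveWhile m pos row = row := by
  rw [solveWhile]; simp [h]

theorem pv_solveWhile_eq (n : Nat) (pos : Nat) (row : List Int)
    (hlen : pos ≤ row.length) (hn : n < 2 ^ pos) :
    solveWhile (n : Int) (pos : Int) row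
      = row.mapIdx (fun i x => if i < pos ∧ n.testBit (pos - 1 - i) then 1 else x) := by
  induction n using Nat.strong_induction_on generalizing pos row with
  | _ n ih =>
  rcases Nat.eq_zero_or_pos n with h0 | hpos
  · subst h0
    rw [solveWhile]
    simp
    apply List.ext_getElem <;> simp
  · have hpos' : 0 < (n : Int) := by exact_mod_cast hpos
    have hp1 : 1 ≤ pos := by
      rcases Nat.eq_zero_or_pos pos with hp | hp
      · rw [hp] at hn; simp at hn; omega
      · omega
    rw [solveWhile]
    rw [dif_pos hpos']
    have hfd : PySem.Int.floordiv (n : Int) 2 = ((n / 2 : Nat) : Int) := by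
      exact_mod_cast PySem.Int.floordiv_natCast n 2
    have hmd : PySem.Int.mod (n : Int) 2 = ((n % 2 : Nat) : Int) := by
      exact_mod_cast PySem.Int.mod_natCast n 2
    have hcast : (pos : Int) - 1 = ((pos - 1 : Nat) : Int) := by omega
    rw [hmd, hcast]
    have hif : (if ((n % 2 : Nat) : Int) = 1 then PySem.List.pySetD row ((pos - 1 : Nat) : Int) 1 else row)
        = (if n % 2 = 1 then row.set (pos - 1) 1 else row) := by
      by_cases hh : n % 2 = 1
      · rw [if_pos (by omega), if_pos hh, PySem.List.pySetD_natCast]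
      · rw [if_neg (by omega), if_neg hh]
    rw [hfd, hif]
    have hlen' : pos - 1 ≤ (if n % 2 = 1 then row.set (pos - 1) 1 else row).length := by
      by_cases hh : n % 2 = 1 <;> simp [hh] <;> omega
    have hn2 : n / 2 < 2 ^ (pos - 1) := by
      have h2p : 2 ^ pos = 2 ^ (pos - 1) * 2 := by
        rw [← pow_succ]; congr 1; omega
      omega
    rw [ih (n / 2) (Nat.div_lt_self hpos (by norm_num)) (pos - 1) _ hlen' hn2]
    by_cases hh : n % 2 = 1
    · rw [if_pos hh]
      apply List.ext_getElem
      · simp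
      · intro i h1 h2
        simp only [List.getElem_mapIdx, List.getElem_set]
        have hi : i < row.length := by simpa using h2
        by_cases hip : i = pos - 1
        · subst hip
          have c2 : pos - 1 < pos := by omega
          have c3 : n.testBit (pos - 1 - (pos - 1)) = true := by
            simp [Nat.testBit_zero, hh]
          simp [c2]
          intro hcon; omega
        · by_cases hlt : i < pos - 1
          · have c1 : i < pos := by omega
            have hbit : (n / 2).testBit (pos - 1 - 1 - i) = n.testBit (pos - 1 - i) := by
              have hs : pos - 1 - i = (pos - 1 - 1 - i) + 1 := by omega
              rw [hs, Nat.testBit_succ]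
            simp [hlt, c1, hbit, show ¬ (pos - 1 = i) by omega]
          · have c1 : ¬ i < pos := by omega
            simp [hlt, c1]
            intro hcon; omega
    · rw [if_neg hh]
      apply List.ext_getElem
      · simp
      · intro i h1 h2
        simp only [List.getElem_mapIdx]
        by_cases hlt : i < pos - 1
        · have c1 : i < pos := by omega
          have hbit : (n / 2).testBit (pos - 1 - 1 - i) = n.testBit (pos - 1 - i) := by
            have hs : pos - 1 - i = (pos - 1 - 1 - i) + 1 := by omega
            rw [hs, Nat.testBit_succ]
          simp [hlt, c1, hbit]
        · by_cases hip : i = pos - 1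
          · subst hip
            have c2 : pos - 1 < pos := by omega
            have c3 : n.testBit (pos - 1 - (pos - 1)) = false := by
              simp [Nat.testBit_zero, hh]
            simp [c2]
            intro hcon; omega
          · have c1 : ¬ i < pos := by omega
            simp [hlt, c1]

-- the character B prints at bit j equals the bit A writes
theorem pv_bit (n j : Nat) :
    (if PySem.Int.band ((n : Int) >>> j) 1 ≠ 0 then '1' else '0')
      = (if n.testBit j then '1' else '0') := by
  have h1 : ((n : Int) >>> j) = ((n >>> j : Nat) : Int) := Int.mem_toNat?.mp rfl
  rw [h1, PySem.Int.band_one]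
  have h2 : PySem.Int.mod ((n >>> j : Nat) : Int) 2 = (((n >>> j) % 2 : Nat) : Int) := by
    exact_mod_cast PySem.Int.mod_natCast (n >>> j) 2
  rw [h2]
  have h3 : n.testBit j = ((n >>> j) % 2 == 1) := by simp [Nat.testBit]
  rw [h3]
  rcases Nat.mod_two_eq_zero_or_one (n >>> j) with h | h <;> simp [h]

-- the final first row of A, for any input passing the guard
theorem pv_row0 (b m : Int) (hg : ¬ solveGuard b m = true) :
    solveWhile (m - 1) (b - 1) (List.replicate (b - 1).toNat (0 : Int) ++ [1])
      = (List.replicate (b - 1).toNat (0 : Int) ++ [1]).mapIdx (fun i x =>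
          if i < (b - 1).toNat ∧ (m - 1).toNat.testBit ((b - 1).toNat - 1 - i) then 1 else x) := by
  by_cases hm : m ≤ 0
  · rw [pv_solveWhile_nonpos _ _ _ (by omega)]
    have hk : (m - 1).toNat = 0 := by omega
    rw [hk]
    rw [show (fun (i : Nat) (x : Int) =>
          if i < (b - 1).toNat ∧ Nat.testBit 0 ((b - 1).toNat - 1 - i) then (1 : Int) else x)
        = fun _ x => x by funext i x; simp]
    exact (pv_mapIdx_id _).symm
  · unfold solveGuard at hg
    by_cases hb : 2 ≤ b
    · rw [if_pos hb] at hg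
      simp only [decide_eq_true_eq, not_lt] at hg
      have hw : (b - 1).toNat = (b - 2).toNat + 1 := by omega
      have hcm : m - 1 = (((m - 1).toNat : Nat) : Int) := by omega
      have hcb : b - 1 = (((b - 1).toNat : Nat) : Int) := by omega
      have hlt : (m - 1).toNat < 2 ^ (b - 1).toNat := by
        have h2 : ((2 : Int) ^ (b - 2).toNat) = ((2 ^ (b - 2).toNat : Nat) : Int) := by push_cast; ring
        rw [h2] at hg
        have hmn : (m - 1).toNat < 2 ^ (b - 2).toNat := by omega
        rw [hw, pow_succ]
        omega
      have happ := pv_solveWhile_eq (m - 1).toNat (b - 1).toNat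
        (List.replicate (b - 1).toNat (0 : Int) ++ [1]) (by simp) hlt
      rw [← hcm, ← hcb] at happ
      exact happ
    · rw [if_neg hb] at hg
      simp only [decide_eq_true_eq] at hg
      omega

-- `str` of a 0/1 entry, as characters
theorem pv_toStr01 (x : Int) (hx : x = 0 ∨ x = 1) :
    (PySem.Int.toStr x).toList = [if x = 1 then '1' else '0'] := by
  rcases hx with h | h <;> subst h <;> decide

-- a non-first row of A as a string
theorem pv_rest_row (b s : Int) (h1 : 1 ≤ s) (h2 : s < b) :
    PySem.Str.join "" (((PySem.List.pyRange 0 b 1).map (fun dest => if dest ≤ s then (0 : Int) else 1)).map PySem.Int.toStr)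
      = String.ofList (List.replicate (s + 1).toNat '0' ++ List.replicate (b - 1 - s).toNat '1') := by
  apply String.toList_inj.mp
  rw [PySem.Str.toList_join]
  simp only [List.map_map, String.toList_ofList]
  have hsplit : PySem.List.pyRange 0 b 1
      = PySem.List.pyRange 0 (s + 1) 1 ++ PySem.List.pyRange (s + 1) b 1 :=
    PySem.List.pyRange_one_append 0 (s + 1) b (by omega) (by omega)
  rw [hsplit, List.map_append]
  have hz : (PySem.List.pyRange 0 (s + 1) 1).map
        ((fun st : String => st.toList) ∘ PySem.Int.toStr ∘ (fun dest => if dest ≤ s then (0 : Int) else 1))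
      = List.replicate (s + 1).toNat ['0'] := by
    rw [show List.replicate (s + 1).toNat ['0']
        = List.replicate (PySem.List.pyRange 0 (s + 1) 1).length ['0'] by
      rw [PySem.List.length_pyRange_one]; congr 1 <;> omega]
    rw [← List.map_const']
    apply List.map_congr_left
    intro x hx
    have hxs : x ≤ s := by
      have := (PySem.List.mem_pyRange_one.mp hx).2; omega
    simp [hxs]
    decide
  have ho : (PySem.List.pyRange (s + 1) b 1).map
        ((fun st : String => st.toList) ∘ PySem.Int.toStr ∘ (fun dest => if dest ≤ s then (0 : Int) else 1))
      = List.replicate (b - 1 - s).toNat ['1'] := by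
    rw [show List.replicate (b - 1 - s).toNat ['1']
        = List.replicate (PySem.List.pyRange (s + 1) b 1).length ['1'] by
      rw [PySem.List.length_pyRange_one]; congr 1 <;> omega]
    rw [← List.map_const']
    apply List.map_congr_left
    intro x hx
    have hxs : ¬ x ≤ s := by
      have := (PySem.List.mem_pyRange_one.mp hx).1; omega
    simp [hxs]
    decide
  rw [hz, ho]
  have : List.replicate (s + 1).toNat ['0'] ++ List.replicate (b - 1 - s).toNat ['1']
      = (List.replicate (s + 1).toNat '0' ++ List.replicate (b - 1 - s).toNat '1').map (fun c => [c]) := by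
    simp
  rw [show ("" : String).toList = [] from rfl, this, PySem.Chars.join_nil_singletons]

-- the first row of A as a string, in terms of the top characters of B's columns
theorem pv_first_row (b m : Int) (hg : ¬ solveGuard b m = true) :
    PySem.Str.join "" ((solveWhile (m - 1) (b - 1) (List.replicate (b - 1).toNat (0 : Int) ++ [1])).map PySem.Int.toStr)
      = String.ofList ((PySem.List.pyRange 0 (max (b - 1) 0) 1).map (fun i =>
          if PySem.Int.band ((max (m - 1) 0) >>> ((max (b - 1) 0) - 1 - i).toNat) 1 ≠ 0 then '1' else '0') ++ ['1']) := by
  apply String.toList_inj.mp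
  rw [pv_row0 b m hg, PySem.Str.toList_join]
  simp only [List.map_map, String.toList_ofList]
  set w : Nat := (b - 1).toNat with hwdef
  set k : Nat := (m - 1).toNat with hkdef
  have hmaxb : max (b - 1) 0 = (w : Int) := by omega
  have hmaxm : max (m - 1) 0 = (k : Int) := by omega
  rw [hmaxb, hmaxm]
  set L : List Int := (List.replicate w (0 : Int) ++ [1]).mapIdx (fun i x =>
    if i < w ∧ k.testBit (w - 1 - i) then 1 else x) with hL
  have hmem : ∀ x ∈ L, x = 0 ∨ x = 1 := by
    intro x hx
    obtain ⟨i, hi, hfx⟩ := List.exists_of_mem_mapIdx hx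
    by_cases hc : i < w ∧ k.testBit (w - 1 - i)
    · right; rw [← hfx]; simp [hc]
    · have : x = (List.replicate w (0 : Int) ++ [1])[i] := by rw [← hfx]; simp [hc]
      rw [this]
      rcases List.mem_append.mp (List.getElem_mem _) with h | h
      · left; exact (List.eq_of_mem_replicate h)
      · right; simpa using h
  have hchars : L.map ((fun st : String => st.toList) ∘ PySem.Int.toStr)
      = (L.map (fun x => if x = 1 then '1' else '0')).map (fun c => [c]) := by
    rw [List.map_map]
    apply List.map_congr_left
    intro x hx
    exact pv_toStr01 x (hmem x hx)
  rw [hchars, show ("" : String).toList = [] from rfl, PySem.Chars.join_nil_singletons]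
  apply List.ext_getElem
  · simp [hL, PySem.List.length_pyRange_one]
  · intro i hi1 hi2
    have hlenL : L.length = w + 1 := by simp [hL]
    have hiw : i < w + 1 := by simpa [hlenL] using hi1
    simp only [List.getElem_map, hL, List.getElem_mapIdx]
    by_cases hc : i < w
    · rw [List.getElem_append_left (by simpa using hc), List.getElem_replicate]
      rw [List.getElem_append_left (by simp [PySem.List.length_pyRange_one]; omega)]
      rw [List.getElem_map, PySem.List.getElem_pyRange_one]
      have hsh : (((w : Int) - 1 - (0 + (i : Int))).toNat) = w - 1 - i := by omega
      rw [hsh, pv_bit k (w - 1 - i)]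
      by_cases hbit : k.testBit (w - 1 - i) <;> simp [hc, hbit]
    · have hieq : i = w := by omega
      subst hieq
      rw [List.getElem_append_right (by simp)]
      rw [List.getElem_append_right (by simp [PySem.List.length_pyRange_one])]
      simp [PySem.List.length_pyRange_one]

-- B's column j, as characters
def pvColChars (k w j : Int) : List Char :=
  (if j = w ∨ PySem.Int.band (k >>> (w - 1 - j).toNat) 1 ≠ 0 then ['1'] else ['0'])
  ++ List.replicate (max (j - 1) 0).toNat '1' ++ List.replicate (w - max (j - 1) 0).toNat '0'

theorem pv_cols_toList (k w : Int) :
    ((PySem.List.pyRange 0 (w + 1) 1).foldl (fun acc j =>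
      acc ++ [(if j = w ∨ PySem.Int.band (k >>> (w - 1 - j).toNat) 1 ≠ 0 then "1" else "0")
        ++ String.ofList (List.replicate (max (j - 1) 0).toNat '1')
        ++ String.ofList (List.replicate (w - max (j - 1) 0).toNat '0')]) []).map String.toList
    = (PySem.List.pyRange 0 (w + 1) 1).map (pvColChars k w) := by
  rw [pv_foldl_push]
  simp only [List.nil_append, List.map_map]
  apply List.map_congr_left
  intro j _
  simp [pvColChars, apply_ite String.toList, String.toList_append, String.toList_ofList]

-- zip(*cols) of equal-length columns is the index-wise transpose
theorem pv_tz (n : Nat) (cols : List (List Char)) (hne : cols ≠ [])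
    (hlen : ∀ c ∈ cols, c.length = n) :
    tzCols cols = (List.range n).map (fun i => cols.map (fun c => c.getD i ' ')) := by
  induction n generalizing cols with
  | zero =>
    rw [tzCols, dif_pos]
    · simp
    · right
      cases cols with
      | nil => exact absurd rfl hne
      | cons c cs =>
        have := hlen c List.mem_cons_self
        simp [List.isEmpty_iff, List.length_eq_zero_iff.mp this]
  | succ n ih =>
    have hni : ¬ (cols = [] ∨ cols.any List.isEmpty = true) := by
      push_neg
      refine ⟨hne, ?_⟩
      simp only [ne_eq, List.any_eq_true, not_exists, not_and, Bool.not_eq_true]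
      intro c hc
      have := hlen c hc
      simp [List.isEmpty_iff]
      intro hc0
      rw [hc0] at this
      simp at this
    rw [tzCols, dif_neg hni]
    rw [ih (cols.map List.tail) (by simpa using hne)
      (by intro c hc
          obtain ⟨c', hc', rfl⟩ := List.mem_map.mp hc
          have := hlen c' hc'
          simp [List.length_tail]; omega)]
    rw [List.range_succ_eq_map, List.map_cons]
    congr 1
    · apply List.map_congr_left
      intro c hc
      have hl := hlen c hc
      cases c with
      | nil => simp at hl
      | cons a t => simp
    · rw [List.map_map]
      apply List.map_congr_left
      intro i _
      simp only [Function.comp]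
      rw [List.map_map]
      apply List.map_congr_left
      intro c hc
      have hl := hlen c hc
      cases c with
      | nil => simp at hl
      | cons a t => simp

theorem pv_getD_rep_rep (a b : Nat) (x y d : Char) (i : Nat) :
    (List.replicate a x ++ List.replicate b y).getD i d
      = if i < a then x else if i < a + b then y else d := by
  unfold List.getD
  by_cases h1 : i < a
  · rw [List.getElem?_append_left (by simpa using h1)]
    simp [List.getElem?_replicate, h1]
  · rw [List.getElem?_append_right (by simp; omega)]
    simp only [List.getElem?_replicate, List.length_replicate]
    split_ifs <;> simp_all <;> omega

theorem pv_col_len (k w j : Int) (hj : 0 ≤ j) (hjw : j < w + 1) :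
    (pvColChars k w j).length = w.toNat + 1 := by
  unfold pvColChars
  split_ifs <;> simp <;> omega

theorem pv_col_get0 (k w j : Int) :
    (pvColChars k w j).getD 0 ' '
      = if j = w ∨ PySem.Int.band (k >>> (w - 1 - j).toNat) 1 ≠ 0 then '1' else '0' := by
  unfold pvColChars
  split_ifs <;> rfl

theorem pv_col_getSucc (k w j : Int) (i : Nat) (hi : (i : Int) < w) :
    (pvColChars k w j).getD (i + 1) ' '
      = if (i : Int) < max (j - 1) 0 then '1' else '0' := by
  unfold pvColChars
  rw [List.append_assoc]
  have hstep : ∀ c : Char, (([c] : List Char)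
      ++ (List.replicate (max (j - 1) 0).toNat '1' ++ List.replicate (w - max (j - 1) 0).toNat '0')).getD (i + 1) ' '
      = (List.replicate (max (j - 1) 0).toNat '1' ++ List.replicate (w - max (j - 1) 0).toNat '0').getD i ' ' := by
    intro c; simp [List.getD]
  by_cases h : j = w ∨ PySem.Int.band (k >>> (w - 1 - j).toNat) 1 ≠ 0
  · rw [if_pos h, hstep, pv_getD_rep_rep]
    split_ifs <;> first | rfl | omega
  · rw [if_neg h, hstep, pv_getD_rep_rep]
    split_ifs <;> first | rfl | omega


-- B's row 0 (the tops of the columns)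
theorem pv_B_row0 (k w : Int) (hw : 0 ≤ w) :
    ((PySem.List.pyRange 0 (w + 1) 1).map (pvColChars k w)).map (fun c => c.getD 0 ' ')
      = (PySem.List.pyRange 0 w 1).map (fun i =>
          if PySem.Int.band (k >>> (w - 1 - i).toNat) 1 ≠ 0 then '1' else '0') ++ ['1'] := by
  rw [List.map_map]
  rw [PySem.List.pyRange_one_append 0 w (w + 1) hw (by omega), List.map_append]
  congr 1
  · apply List.map_congr_left
    intro j hj
    have hjw : j < w := (PySem.List.mem_pyRange_one.mp hj).2
    simp only [Function.comp_apply]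
    rw [pv_col_get0]
    by_cases hP : PySem.Int.band (k >>> (w - 1 - j).toNat) 1 ≠ 0 <;>
      simp [hP, show ¬ j = w by omega]
  · rw [PySem.List.pyRange_one_cons (by omega), PySem.List.pyRange_one_eq_nil (le_refl _)]
    simp only [List.map_cons, List.map_nil, Function.comp_apply]
    rw [pv_col_get0, if_pos (Or.inl rfl)]

-- B's row t+1 (characters below the top, column-wise)
theorem pv_B_rowSucc (k w : Int) (t : Nat) (ht : (t : Int) < w) :
    ((PySem.List.pyRange 0 (w + 1) 1).map (pvColChars k w)).map (fun c => c.getD (t + 1) ' ')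
      = List.replicate (t + 2) '0' ++ List.replicate (w - 1 - t).toNat '1' := by
  rw [List.map_map]
  rw [PySem.List.pyRange_one_append 0 ((t : Int) + 2) (w + 1) (by omega) (by omega), List.map_append]
  congr 1
  · rw [show List.replicate (t + 2) '0'
        = List.replicate (PySem.List.pyRange 0 ((t : Int) + 2) 1).length '0' by
      rw [PySem.List.length_pyRange_one]; congr 1 <;> omega]
    rw [← List.map_const']
    apply List.map_congr_left
    intro j hj
    obtain ⟨hj0, hj1⟩ := PySem.List.mem_pyRange_one.mp hj
    simp only [Function.comp_apply]
    rw [pv_col_getSucc k w j t ht, if_neg (by omega)]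
  · rw [show List.replicate (w - 1 - t).toNat '1'
        = List.replicate (PySem.List.pyRange ((t : Int) + 2) (w + 1) 1).length '1' by
      rw [PySem.List.length_pyRange_one]; congr 1 <;> omega]
    rw [← List.map_const']
    apply List.map_congr_left
    intro j hj
    obtain ⟨hj0, hj1⟩ := PySem.List.mem_pyRange_one.mp hj
    simp only [Function.comp_apply]
    rw [pv_col_getSucc k w j t ht, if_pos (by omega)]

-- ===== VERDICT (by name: the statement is the Claim_ definition above) =====
set_option maxHeartbeats 1000000 in
theorem solve_spec : Claim_equal_solve := by
  unfold Claim_equal_solve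
  intro b m _hdom
  unfold Spec_solve solve solve_alt
  have hgg : (if 2 ≤ b then decide ((2 : Int) ^ (b - 2).toNat < m) else decide (1 ≤ m))
      = solveGuard b m := rfl
  rw [hgg]
  by_cases hguard : solveGuard b m = true
  · rw [if_pos hguard, if_pos hguard]
  · rw [if_neg hguard, if_neg hguard]
    simp only [pv_foldl_push, List.nil_append, List.singleton_append, List.tail_cons,
      List.map_cons, List.map_map]
    have hget : PySem.List.pyGetD ((List.replicate (b - 1).toNat (0 : Int) ++ [1])
        :: (PySem.List.pyRange 1 b 1).map (fun source =>
          (PySem.List.pyRange 0 b 1).map (fun dest => if dest ≤ source then (0 : Int) else 1))) 0 []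
        = List.replicate (b - 1).toNat (0 : Int) ++ [1] := by
      simp [pysem]
    rw [hget]
    set k : Int := max (m - 1) 0 with hk
    set w : Int := max (b - 1) 0 with hwdef
    have hw0 : 0 ≤ w := by omega
    have hcols := pv_cols_toList k w
    rw [pv_foldl_push, List.nil_append, List.map_map] at hcols
    rw [hcols]
    have hlen : ∀ c ∈ (PySem.List.pyRange 0 (w + 1) 1).map (pvColChars k w),
        c.length = w.toNat + 1 := by
      intro c hc
      obtain ⟨j, hj, rfl⟩ := List.mem_map.mp hc
      obtain ⟨hj0, hj1⟩ := PySem.List.mem_pyRange_one.mp hj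
      exact pv_col_len k w j hj0 hj1
    have hne : (PySem.List.pyRange 0 (w + 1) 1).map (pvColChars k w) ≠ [] := by
      apply List.ne_nil_of_length_pos
      simp only [List.length_map, PySem.List.length_pyRange_one]
      omega
    rw [pv_tz (w.toNat + 1) _ hne hlen]
    rw [List.range_succ_eq_map]
    simp only [List.map_cons, List.map_map]
    congr 1
    congr 1
    refine congrArg₂ List.cons ?_ ?_
    · -- first row
      rw [pv_first_row b m hguard, ← hk, ← hwdef]
      have h0 := pv_B_row0 k w hw0
      rw [List.map_map] at h0
      exact congrArg String.ofList h0.symm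
    · -- remaining rows
      apply List.ext_getElem
      · simp only [List.length_map, PySem.List.length_pyRange_one, List.length_range]
        omega
      · intro t h1 h2
        have htw : t < w.toNat := by
          simpa only [List.length_map, List.length_range] using h2
        have hb2 : 2 ≤ b := by omega
        rw [List.getElem_map, List.getElem_map, PySem.List.getElem_pyRange_one,
          List.getElem_range]
        simp only [Function.comp_apply]
        rw [pv_rest_row b (1 + (t : Int)) (by omega) (by omega)]
        have hsucc := pv_B_rowSucc k w t (by omega)
        rw [List.map_map] at hsucc
        simp only [Nat.succ_eq_add_one]
        rw [hsucc]
        congr 1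
        congr 1
        · congr 1; omega
        · congr 1; omega
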